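-- pv_equiv track=rewrite | github.com/edt-yxz-zzd/python3_src | seed/math/find_arbitrary_one_primitive_root_mod_prime__using_factorization_of_pmm_.py | _iter_unsorted_gs4same_order_mod_
-- ===== SOURCE A (Python) =====
-- def _iter_coprimes4prime_bases_(ps, may_us, /):
--     'sized[prime] -> Iter coprime/uint'
--     assert not iter(ps) is ps
--     L = len(ps)
--     def is_coprime_(u, /):
--         return all(u%p for p in ps)
--
--     if may_us is None:
--         from itertools import count
--         us = count(0)
--     else:
--         us = may_us
--     us = iter(us)
--
--     if not L:
--         return us
--     assert L
--     return filter(is_coprime_, us)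
--
-- def _iter_unsorted_gs4same_order_mod_(M, g, order4g, ps4order4g, /):
--     'M -> g -> order4g{[order_mod_(M;g) == order4g]} -> ps4order4g{[ps4order4g==all_prime_factors_of(order4g)]} -> (Iter pw){[order_mod_(M;pw) == order4g]}'
--     from itertools import pairwise, chain
--     assert M >= 2
--     iter_coprimes4order4g = _iter_coprimes4prime_bases_(ps4order4g, range(order4g))
--     iter_0_or_coprimes4order4g = chain([0], iter_coprimes4order4g)
--     _e = 0
--     sz = 0
--     pw = 1
--     # [pw == g**0%M]
--     for _j, j in pairwise(iter_0_or_coprimes4order4g):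
--         # [are_coprime(order4g, j)]
--         # [pw == g**_j%M]
--         delta = j-_j
--         pw = pw*pow(g,delta,M)%M
--         # [pw == g**(_j+delta)%M]
--         # [pw == g**j%M]
--
--         # !! [are_coprime(order4g, j)]
--         # !! [pw == g**j%M]
--         # [order_mod_(M;pw) == order_mod_(M;g) == order4g]
--         yield pw
--         sz += 1
--     return sz
-- ===== SOURCE B (Python) =====
-- def _iter_unsorted_gs4same_order_mod_(M, g, order4g, ps4order4g, /):
--     'direct per-exponent recomputation: pow(g, j, M) for each j in range(order4g) coprime to every prime factor'
--     assert M >= 2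
--     sz = 0
--     for j in range(order4g):
--         if any(j % p == 0 for p in ps4order4g):
--             continue
--         yield pow(g, j, M)
--         sz += 1
--     return sz
-- ===== Notes on version B (the rewrite author's own statement) =====
-- stated objective: simpler
-- what changed: Replaced the chain([0],...)/pairwise pipeline with its running product accumulator pw (multiplying by pow(g, j-_j, M) each step) by one plain loop over range(order4g) that skips non-coprime j and recomputes pow(g, j, M) independently for each yielded j.
import Mathlib
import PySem

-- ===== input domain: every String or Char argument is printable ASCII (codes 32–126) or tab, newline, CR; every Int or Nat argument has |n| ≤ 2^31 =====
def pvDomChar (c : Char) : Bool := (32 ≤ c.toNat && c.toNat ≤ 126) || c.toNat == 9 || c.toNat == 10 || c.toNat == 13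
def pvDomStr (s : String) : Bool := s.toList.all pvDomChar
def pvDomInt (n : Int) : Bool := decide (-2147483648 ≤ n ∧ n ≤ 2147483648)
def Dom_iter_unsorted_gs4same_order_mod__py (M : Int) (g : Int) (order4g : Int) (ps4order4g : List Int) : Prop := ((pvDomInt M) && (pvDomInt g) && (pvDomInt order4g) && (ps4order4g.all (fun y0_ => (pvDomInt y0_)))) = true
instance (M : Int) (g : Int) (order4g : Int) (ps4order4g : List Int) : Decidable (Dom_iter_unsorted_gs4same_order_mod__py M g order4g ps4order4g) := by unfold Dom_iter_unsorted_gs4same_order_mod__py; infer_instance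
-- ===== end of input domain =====

-- B replaces A's chain/pairwise incremental-accumulator pipeline by one plain loop that
-- recomputes pow(g, j, M) from scratch for each coprime j (objective: simpler).

-- ===== PORT A =====
-- helper _iter_coprimes4prime_bases_ (called with may_us = range(order4g), so us is a list here)
def pvIterCoprimes (ps : List Int) (us : List Int) : List Int :=
  if ps.length = 0 then us
  else us.filter (fun u => ps.all (fun p => PySem.Int.mod u p != 0))

def iter_unsorted_gs4same_order_mod__py (M : Int) (g : Int) (order4g : Int) (ps4order4g : List Int) : List Int :=
  let iter_coprimes4order4g := pvIterCoprimes ps4order4g (PySem.List.pyRange 0 order4g 1)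
  let iter_0_or_coprimes4order4g := 0 :: iter_coprimes4order4g   -- chain([0], …)
  -- for _j, j in pairwise(xs):  the pairs are xs.zip xs.tail
  -- pow(g, delta, M): every call the Python loop reaches has 0 ≤ delta, where .toNat is exact
  ((iter_0_or_coprimes4order4g.zip iter_0_or_coprimes4order4g.tail).foldl
    (fun (st : Int × List Int) jj =>
      let pw := PySem.Int.mod (st.1 * PySem.Int.powMod g (jj.2 - jj.1).toNat M) M
      (pw, st.2 ++ [pw]))
    (1, [])).2

-- ===== PORT B =====
def iter_unsorted_gs4same_order_mod__py_alt (M : Int) (g : Int) (order4g : Int) (ps4order4g : List Int) : List Int :=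
  (PySem.List.pyRange 0 order4g 1).foldl
    (fun out j =>
      if ps4order4g.any (fun p => PySem.Int.mod j p == 0) then out   -- continue
      else out ++ [PySem.Int.powMod g j.toNat M])                    -- yield pow(g, j, M)
    []

-- ===== PRECONDITION & SPEC =====
-- Pre_ excludes exactly the inputs on which the Python A raises: M < 2 (AssertionError), and the
-- inputs where the lazily filtered stream reaches u % 0 (ZeroDivisionError): 0 ∈ ps4order4g with a
-- positive range, unless short-circuiting saves it (the prefix before the first 0 rejects every u,
-- which happens exactly when it contains ±1, or when order4g = 1 with a nonempty prefix).
def Pre_iter_unsorted_gs4same_order_mod__py (M : Int) (g : Int) (order4g : Int) (ps4order4g : List Int) : Prop :=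
  2 ≤ M ∧ ¬ ((0:Int) ∈ ps4order4g ∧ 1 ≤ order4g ∧
      (ps4order4g.takeWhile (fun p => p != 0) = [] ∨
       (2 ≤ order4g ∧ ∀ p ∈ ps4order4g.takeWhile (fun p => p != 0), p ≠ 1 ∧ p ≠ -1)))
instance (M : Int) (g : Int) (order4g : Int) (ps4order4g : List Int) : Decidable (Pre_iter_unsorted_gs4same_order_mod__py M g order4g ps4order4g) := by unfold Pre_iter_unsorted_gs4same_order_mod__py; infer_instance

def pvWitness_iter_unsorted_gs4same_order_mod__py : Int × Int × Int × List Int := (7, 3, 6, [2, 3])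

def Spec_iter_unsorted_gs4same_order_mod__py (M : Int) (g : Int) (order4g : Int) (ps4order4g : List Int) (out : List Int) : Prop := out = iter_unsorted_gs4same_order_mod__py_alt M g order4g ps4order4g
instance (M : Int) (g : Int) (order4g : Int) (ps4order4g : List Int) (out : List Int) : Decidable (Spec_iter_unsorted_gs4same_order_mod__py M g order4g ps4order4g out) := by unfold Spec_iter_unsorted_gs4same_order_mod__py; infer_instance

-- ===== CLAIM (what is proved, stated in full; the proofs are below) =====
def Claim_equal_iter_unsorted_gs4same_order_mod__py : Prop := ∀ (M : Int) (g : Int) (order4g : Int) (ps4order4g : List Int), Dom_iter_unsorted_gs4same_order_mod__py M g order4g ps4order4g → Pre_iter_unsorted_gs4same_order_mod__py M g order4g ps4order4g → Spec_iter_unsorted_gs4same_order_mod__py M g order4g ps4order4g (iter_unsorted_gs4same_order_mod__py M g order4g ps4order4g)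

-- ===== LEMMAS AND PROOFS =====

-- B's loop is a filter-then-map over the range
lemma alt_eq_filter_map (M g order4g : Int) (ps : List Int) :
    iter_unsorted_gs4same_order_mod__py_alt M g order4g ps
      = ((PySem.List.pyRange 0 order4g 1).filter
          (fun j => !(ps.any (fun p => PySem.Int.mod j p == 0)))).map
          (fun j => PySem.Int.powMod g j.toNat M) := by
  unfold iter_unsorted_gs4same_order_mod__py_alt
  have h : (fun (out : List Int) (j : Int) =>
        if ps.any (fun p => PySem.Int.mod j p == 0) then out
        else out ++ [PySem.Int.powMod g j.toNat M])
      = (fun out j =>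
        if !(ps.any (fun p => PySem.Int.mod j p == 0)) then out ++ [PySem.Int.powMod g j.toNat M]
        else out) := by
    funext out j
    cases ps.any (fun p => PySem.Int.mod j p == 0) <;> simp
  rw [h, PySem.List.foldl_append_if]
  simp

-- A's coprime stream is the same filter
lemma iterCoprimes_eq (ps us : List Int) :
    pvIterCoprimes ps us
      = us.filter (fun u => !(ps.any (fun p => PySem.Int.mod u p == 0))) := by
  unfold pvIterCoprimes
  rcases ps with _ | ⟨p, ps'⟩
  · simp
  · rw [if_neg (by simp)]
    refine List.filter_congr ?_
    intro u _
    simp [List.all_eq_not_any_not, bne]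

-- A's incremental-power fold over the pairwise pairs produces the map of independent powers
lemma foldA (M g : Int) (hM : 0 < M) :
    ∀ (s : List Int) (prev : Int) (acc : List Int),
      0 ≤ prev → List.Pairwise (· ≤ ·) (prev :: s) →
      (((prev :: s).zip s).foldl
        (fun (st : Int × List Int) jj =>
          let pw := PySem.Int.mod (st.1 * PySem.Int.powMod g (jj.2 - jj.1).toNat M) M
          (pw, st.2 ++ [pw]))
        (PySem.Int.powMod g prev.toNat M, acc)).2
      = acc ++ s.map (fun j => PySem.Int.powMod g j.toNat M) := by
  intro s
  induction s with
  | nil => intro prev acc _ _; simp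
  | cons j rest ih =>
    intro prev acc hprev hpair
    have hpj : prev ≤ j := (List.pairwise_cons.mp hpair).1 j (by simp)
    have hstep : PySem.Int.mod (PySem.Int.powMod g prev.toNat M * PySem.Int.powMod g (j - prev).toNat M) M
        = PySem.Int.powMod g j.toNat M := by
      unfold PySem.Int.powMod
      rw [PySem.Int.mod_eq_emod_of_pos hM, PySem.Int.mod_eq_emod_of_pos hM,
          PySem.Int.mod_eq_emod_of_pos hM, ← Int.mul_emod, ← pow_add]
      have he : prev.toNat + (j - prev).toNat = j.toNat := by omega
      rw [he, PySem.Int.mod_eq_emod_of_pos hM]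
    simp only [List.zip_cons_cons, List.foldl_cons]
    rw [hstep]
    rw [ih j (acc ++ [PySem.Int.powMod g j.toNat M]) (by omega)
      ((List.pairwise_cons.mp hpair).2)]
    simp

theorem iter_unsorted_gs4same_order_mod__py_spec : Claim_equal_iter_unsorted_gs4same_order_mod__py := by
  intro M g order4g ps hDom hPre
  obtain ⟨hM, -⟩ := hPre
  unfold Spec_iter_unsorted_gs4same_order_mod__py
  rw [alt_eq_filter_map]
  unfold iter_unsorted_gs4same_order_mod__py
  rw [iterCoprimes_eq]
  set s := (PySem.List.pyRange 0 order4g 1).filter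
      (fun u => !(ps.any (fun p => PySem.Int.mod u p == 0))) with hs
  have hsub : s.Sublist (PySem.List.pyRange 0 order4g 1) := List.filter_sublist
  have hlt : s.Pairwise (· < ·) := (PySem.List.pairwise_lt_pyRange_one 0 order4g).sublist hsub
  have hmem : ∀ x ∈ s, (0:Int) ≤ x := by
    intro x hx
    have := (PySem.List.mem_pyRange_one).mp (hsub.mem hx)
    omega
  have hpair : List.Pairwise (· ≤ ·) ((0:Int) :: s) := by
    refine List.pairwise_cons.mpr ⟨hmem, hlt.imp (fun h => le_of_lt h)⟩
  have h1 : (1:Int) = PySem.Int.powMod g ((0:Int)).toNat M := by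
    unfold PySem.Int.powMod
    rw [PySem.Int.mod_eq_emod_of_pos (by omega)]
    have hg : g ^ ((0:Int)).toNat = 1 := by norm_num
    rw [hg]
    exact (Int.emod_eq_of_lt (by omega) (by omega)).symm
  simp only [List.tail_cons]
  rw [h1, foldA M g (by omega) s 0 [] le_rfl hpair]
  simp
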